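-- pv_equiv track=rewrite | github.com/shhuan1989/algorithms | luogu/p1053.py | find
-- ===== SOURCE A (Python) =====
-- import collections
--
-- def find(path):
--     n = len(path)
--     wc = collections.defaultdict(int)
--
--     for i, v in enumerate(path):
--         u = i + 1
--         d = v - u if v >= u else n-u+v
--         wc[d] += 1
--
--     return max(wc.values() or [0])
-- ===== SOURCE B (Python) =====
-- def find(path):
--     n = len(path)
--     ds = sorted(v - u if v >= u else n - u + v for u, v in enumerate(path, 1))
--     best = 0
--     cur = 0
--     prev = None
--     for x in ds:
--         cur = cur + 1 if x == prev else 1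
--         if cur > best:
--             best = cur
--         prev = x
--     return best
-- ===== Notes on version B (the rewrite author's own statement) =====
-- stated objective: alternative
-- what changed: Replaces the hash-frequency counter (defaultdict + max over values) with sort-then-longest-run: the displacement list is sorted so equal values become adjacent, and one scan tracks the current and maximal run length.
import Mathlib
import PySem

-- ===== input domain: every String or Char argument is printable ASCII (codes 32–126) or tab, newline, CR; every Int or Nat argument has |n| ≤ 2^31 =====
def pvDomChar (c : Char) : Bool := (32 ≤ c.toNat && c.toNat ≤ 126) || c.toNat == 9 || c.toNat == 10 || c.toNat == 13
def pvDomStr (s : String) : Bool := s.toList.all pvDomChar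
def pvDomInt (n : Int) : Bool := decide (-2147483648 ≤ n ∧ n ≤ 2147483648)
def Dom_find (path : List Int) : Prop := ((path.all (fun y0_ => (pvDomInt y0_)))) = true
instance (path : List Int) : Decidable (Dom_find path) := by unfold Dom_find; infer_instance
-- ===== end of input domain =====

-- B replaces A's hash-frequency counting with sort-then-longest-run over the
-- displacement list (alternative algorithm, same result).

-- ===== PORT A =====
-- literal port: defaultdict(int) counter over enumerate(path), then max(values or [0])
def find (path : List Int) : Int :=
  let n : Int := path.length
  let wc : PySem.Dict Int Int :=
    (PySem.List.enumerate path).foldl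
      (fun wc iv =>
        let u : Int := iv.1 + 1
        let d : Int := if iv.2 ≥ u then iv.2 - u else n - u + iv.2
        wc.modify d 0 (· + 1))
      PySem.Dict.empty
  (PySem.List.max? (if wc.values.isEmpty then [0] else wc.values) (fun x => x)).getD 0

-- ===== PORT B =====
-- literal port of Source B's loop: run-length scan with state (prev, cur, best)
def findAltScan : List Int → Option Int → Int → Int → Int
  | [], _, _, best => best
  | x :: xs, prev, cur, best =>
    let cur' := if some x = prev then cur + 1 else 1
    findAltScan xs (some x) cur' (if cur' > best then cur' else best)

-- literal port of Source B: sorted displacement list, then the run-length scan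
def find_alt (path : List Int) : Int :=
  let n : Int := path.length
  let ds : List Int :=
    PySem.List.sorted
      ((PySem.List.enumerate path 1).map
        (fun uv => if uv.2 ≥ uv.1 then uv.2 - uv.1 else n - uv.1 + uv.2))
      (fun x => x) false
  findAltScan ds none 0 0

-- ===== PRECONDITION & SPEC =====
def Spec_find (path : List Int) (out : Int) : Prop := out = find_alt path
instance (path : List Int) (out : Int) : Decidable (Spec_find path out) := by unfold Spec_find; infer_instance

-- ===== CLAIM =====
def Claim_equal_find : Prop := ∀ (path : List Int), Dom_find path → Spec_find path (find path)

-- ===== LEMMAS AND PROOFS =====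

-- both programs return "the maximal multiplicity in the list, 0 if empty"
def MaxSpec (l : List Int) (r : Int) : Prop :=
  (l = [] ∧ r = 0) ∨ ∃ x, x ∈ l ∧ r = (l.count x : Int) ∧ ∀ y ∈ l, l.count y ≤ l.count x

theorem maxSpec_unique {l : List Int} {r₁ r₂ : Int}
    (h₁ : MaxSpec l r₁) (h₂ : MaxSpec l r₂) : r₁ = r₂ := by
  rcases h₁ with ⟨hn, h⟩ | ⟨x, hx, hr, hmax⟩
  · rcases h₂ with ⟨_, h'⟩ | ⟨x, hx, _, _⟩
    · omega
    · subst hn; simp at hx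
  · rcases h₂ with ⟨hn, _⟩ | ⟨x', hx', hr', hmax'⟩
    · subst hn; simp at hx
    · have := hmax x' hx'
      have := hmax' x hx
      omega

theorem maxSpec_perm {l₁ l₂ : List Int} {r : Int}
    (hp : l₁.Perm l₂) (h : MaxSpec l₁ r) : MaxSpec l₂ r := by
  rcases h with ⟨hn, hr⟩ | ⟨x, hx, hr, hmax⟩
  · left
    subst hn
    exact ⟨hp.symm.eq_nil, hr⟩
  · right
    exact ⟨x, hp.mem_iff.mp hx, by rw [hr, hp.count_eq], fun y hy => by
      rw [← hp.count_eq, ← hp.count_eq]; exact hmax y (hp.mem_iff.mpr hy)⟩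

theorem count_single_ne {y x : Int} (h : y ≠ x) : List.count y [x] = 0 :=
  List.count_eq_zero.mpr (by simp [h])

theorem count_append_single_ne {y x : Int} (t : List Int) (h : y ≠ x) :
    (t ++ [x]).count y = t.count y := by
  rw [List.count_append, count_single_ne h]
  omega

-- A's loop computes a key from each pair then counts it: it is the counter of the mapped list.
theorem foldl_modify_key_eq_counter_map (key : Int × Int → Int) :
    ∀ (l : List (Int × Int)) (d : PySem.Dict Int Int),
      l.foldl (fun wc iv => wc.modify (key iv) 0 (· + 1)) d
        = (l.map key).foldl (fun wc x => wc.modify x 0 (· + 1)) d := by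
  intro l
  induction l with
  | nil => intro d; rfl
  | cons h t ih => intro d; simp [List.foldl, List.map, ih]

-- shifting the enumerate start by one vs adding one to the index
theorem enumerate_shift (f : Int → Int → Int) :
    ∀ (xs : List Int) (s : Int),
      (PySem.List.enumerate xs s).map (fun iv => f (iv.1 + 1) iv.2)
        = (PySem.List.enumerate xs (s + 1)).map (fun uv => f uv.1 uv.2) := by
  intro xs
  induction xs with
  | nil => intro s; rfl
  | cons h t ih =>
      intro s
      simp only [PySem.List.enumerate_cons, List.map_cons, ih]

-- A returns the maximal multiplicity of its displacement list
theorem find_maxSpec (path : List Int) :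
    MaxSpec
      ((PySem.List.enumerate path 1).map
        (fun uv => if uv.2 ≥ uv.1 then uv.2 - uv.1
                   else (path.length : Int) - uv.1 + uv.2))
      (find path) := by
  unfold find
  simp only []
  rw [foldl_modify_key_eq_counter_map
        (key := fun iv =>
          if iv.2 ≥ iv.1 + 1 then iv.2 - (iv.1 + 1)
          else (path.length : Int) - (iv.1 + 1) + iv.2)]
  rw [show ((PySem.List.enumerate path).map
        (fun iv => if iv.2 ≥ iv.1 + 1 then iv.2 - (iv.1 + 1)
                   else (path.length : Int) - (iv.1 + 1) + iv.2))
      = (PySem.List.enumerate path 1).map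
          (fun uv => if uv.2 ≥ uv.1 then uv.2 - uv.1
                     else (path.length : Int) - uv.1 + uv.2) from by
    have := enumerate_shift
      (f := fun u v => if v ≥ u then v - u else (path.length : Int) - u + v) path 0
    simpa using this]
  set ds := (PySem.List.enumerate path 1).map
      (fun uv => if uv.2 ≥ uv.1 then uv.2 - uv.1
                 else (path.length : Int) - uv.1 + uv.2) with hds
  have hcnt : ds.foldl (fun wc x => wc.modify x 0 (· + 1)) PySem.Dict.empty
      = PySem.Dict.counter ds := (PySem.Dict.counter_eq_foldl ds).symm
  rw [hcnt]
  have hvals : (PySem.Dict.counter ds).values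
      = (PySem.Set.ofList ds).map (fun k => (ds.count k : Int)) := by
    show ((PySem.Dict.counter ds).items.map (·.2))
        = (PySem.Set.ofList ds).map (fun k => (ds.count k : Int))
    rw [PySem.Dict.items_counter]
    simp [List.map_map, Function.comp]
  rw [hvals]
  by_cases hdnil : ds = []
  · left
    refine ⟨hdnil, ?_⟩
    rw [hdnil]
    simp [PySem.Set.ofList, PySem.List.max?_id_cons]
  · -- nonempty: max? returns some m
    rcases List.exists_mem_of_ne_nil ds hdnil with ⟨z, hz⟩
    have hzS : z ∈ (PySem.Set.ofList ds : List Int) := (PySem.Set.mem_ofList _ _).mpr hz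
    have hne : ((PySem.Set.ofList ds : List Int).map (fun k => (ds.count k : Int))) ≠ [] := by
      intro h
      rw [List.map_eq_nil_iff.mp h] at hzS
      simp at hzS
    have hEmpty : (((PySem.Set.ofList ds : List Int).map
        (fun k => (ds.count k : Int))).isEmpty) = false := by
      simpa [List.isEmpty_iff] using hne
    rw [hEmpty]
    simp only [Bool.false_eq_true, if_false]
    rcases hm : PySem.List.max?
        ((PySem.Set.ofList ds : List Int).map (fun k => (ds.count k : Int)))
        (fun x => x) with _ | m
    · exact absurd ((PySem.List.max?_eq_none_iff _ _).mp hm) hne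
    · have hmem := PySem.List.max?_mem hm
      have hmax := PySem.List.max?_isMax hm
      rcases List.mem_map.mp hmem with ⟨x, hxS, hxm⟩
      right
      refine ⟨x, (PySem.Set.mem_ofList _ _).mp hxS, ?_, ?_⟩
      · simp only [Option.getD_some]
        exact hxm.symm
      · intro y hy
        have hyS : y ∈ (PySem.Set.ofList ds : List Int) := (PySem.Set.mem_ofList _ _).mpr hy
        have h1 : ((ds.count y : Int)) ≤ m :=
          hmax _ (List.mem_map.mpr ⟨y, hyS, rfl⟩)
        omega

-- B's scan: invariant over the processed prefix t (p = last of t, cur = count of p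
-- in t, best = maximal multiplicity of t; remaining s is sorted and ≥ p).
theorem findAltScan_maxSpec :
    ∀ (s t : List Int) (p cur best : Int),
      s.Pairwise (· ≤ ·) →
      (∀ y ∈ s, p ≤ y) →
      (∀ y ∈ t, y ≤ p) →
      p ∈ t →
      cur = (t.count p : Int) →
      MaxSpec t best →
      MaxSpec (t ++ s) (findAltScan s (some p) cur best) := by
  intro s
  induction s with
  | nil =>
      intro t p cur best _ _ _ _ _ hms
      simpa [findAltScan] using hms
  | cons x xs ih =>
      intro t p cur best hsort hge hle hpmem hcur hms
      have hsort' : xs.Pairwise (· ≤ ·) := hsort.of_cons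
      have hge' : ∀ y ∈ xs, x ≤ y := fun y hy => (List.pairwise_cons.mp hsort).1 y hy
      have hpx : p ≤ x := hge x (by simp)
      rcases hms with ⟨hn, _⟩ | ⟨w, hw, hbw, hwmax⟩
      · subst hn; simp at hpmem
      have hbest1 : (1 : Int) ≤ best := by
        have : 1 ≤ t.count w := List.count_pos_iff.mpr hw
        omega
      have hle' : ∀ y ∈ t ++ [x], y ≤ x := by
        intro y hy
        rcases List.mem_append.mp hy with h | h
        · exact le_trans (hle y h) hpx
        · simp at h; omega
      show MaxSpec (t ++ x :: xs) _
      have hassoc : t ++ x :: xs = (t ++ [x]) ++ xs := by simp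
      rw [hassoc]
      by_cases hxp : x = p
      · -- run continues
        subst hxp
        have hstep : findAltScan (x :: xs) (some x) cur best
            = findAltScan xs (some x) (cur + 1)
                (if cur + 1 > best then cur + 1 else best) := by
          simp [findAltScan]
        rw [hstep]
        have hcx : ((t ++ [x]).count x : Int) = cur + 1 := by
          rw [hcur]; simp [List.count_append]
        have hcount_ne : ∀ y : Int, y ≠ x → (t ++ [x]).count y = t.count y := by
          intro y hne
          exact count_append_single_ne t hne
        have hmem_t : ∀ y : Int, y ∈ t ++ [x] → y ≠ x → y ∈ t := by
          intro y hy hne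
          rcases List.mem_append.mp hy with h | h
          · exact h
          · simp at h; exact absurd h hne
        apply ih
        · exact hsort'
        · exact hge'
        · exact hle'
        · simp
        · omega
        · -- MaxSpec (t ++ [x]) of the updated best
          right
          by_cases hgt : cur + 1 > best
          · refine ⟨x, by simp, by rw [if_pos hgt]; omega, ?_⟩
            intro y hy
            by_cases hne : y = x
            · subst hne; omega
            · have h1 := hwmax y (hmem_t y hy hne)
              have h2 := hcount_ne y hne
              omega
          · push Not at hgt
            have hwx : w ≠ x := by
              intro h; subst h; omega
            refine ⟨w, by simp [hw], ?_, ?_⟩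
            · rw [if_neg (by omega : ¬ cur + 1 > best)]
              rw [hcount_ne w hwx]; exact hbw
            · intro y hy
              rw [hcount_ne w hwx]
              by_cases hne : y = x
              · subst hne; omega
              · have h1 := hwmax y (hmem_t y hy hne)
                rw [hcount_ne y hne]; omega
      · -- new value x : fresh run of length 1
        have hstep : findAltScan (x :: xs) (some p) cur best
            = findAltScan xs (some x) 1 (if (1:Int) > best then 1 else best) := by
          simp [findAltScan, hxp]
        rw [hstep]
        have hxnotint : x ∉ t := by
          intro hxt
          have := hle x hxt
          have hpltx : p < x := lt_of_le_of_ne hpx (fun h => hxp h.symm)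
          omega
        apply ih
        · exact hsort'
        · exact hge'
        · exact hle'
        · simp
        · simp [List.count_append, List.count_eq_zero_of_not_mem hxnotint]
        · right
          rw [if_neg (by omega)]
          refine ⟨w, by simp [hw], ?_, ?_⟩
          · have hwx : w ≠ x := fun h => hxnotint (h ▸ hw)
            rw [count_append_single_ne t hwx, hbw]
          · intro y hy
            have hwx : w ≠ x := fun h => hxnotint (h ▸ hw)
            have hcw : (t ++ [x]).count w = t.count w :=
              count_append_single_ne t hwx
            rcases List.mem_append.mp hy with h | h
            · by_cases hye : y = x
              · subst hye; exact absurd h hxnotint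
              · rw [count_append_single_ne t hye, hcw]; exact hwmax y h
            · simp only [List.mem_singleton] at h
              subst h
              have hyx1 : (t ++ [y]).count y = 1 := by
                rw [List.count_append, List.count_eq_zero_of_not_mem hxnotint]
                simp
              rw [hyx1, hcw]
              exact List.count_pos_iff.mpr hw

theorem findAltScan_top (s : List Int) (hs : s.Pairwise (· ≤ ·)) :
    MaxSpec s (findAltScan s none 0 0) := by
  cases s with
  | nil => left; exact ⟨rfl, rfl⟩
  | cons x xs =>
      have hstep : findAltScan (x :: xs) none 0 0 = findAltScan xs (some x) 1 1 := by
        simp [findAltScan]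
      rw [hstep]
      have h := findAltScan_maxSpec xs [x] x 1 1 hs.of_cons
        (fun y hy => (List.pairwise_cons.mp hs).1 y hy)
        (by simp) (by simp) (by simp)
        (by right; exact ⟨x, by simp, by simp, by intro y hy; simp at hy; subst hy; simp⟩)
      simpa using h

theorem find_alt_maxSpec (path : List Int) :
    MaxSpec
      ((PySem.List.enumerate path 1).map
        (fun uv => if uv.2 ≥ uv.1 then uv.2 - uv.1
                   else (path.length : Int) - uv.1 + uv.2))
      (find_alt path) := by
  unfold find_alt
  simp only []
  set ds := (PySem.List.enumerate path 1).map
      (fun uv => if uv.2 ≥ uv.1 then uv.2 - uv.1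
                 else (path.length : Int) - uv.1 + uv.2) with hds
  have hperm : (PySem.List.sorted ds (fun x => x) false).Perm ds :=
    PySem.List.sorted_perm ds (fun x => x) false
  have hsorted : (PySem.List.sorted ds (fun x => x) false).Pairwise (· ≤ ·) := by
    have := PySem.List.sorted_pairwise (xs := ds) (key := fun x => x)
    simpa using this
  exact maxSpec_perm hperm (findAltScan_top _ hsorted)

theorem find_eq_find_alt (path : List Int) : find path = find_alt path :=
  maxSpec_unique (find_maxSpec path) (find_alt_maxSpec path)

-- ===== VERDICT =====
theorem find_spec : Claim_equal_find := by
  intro path _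
  unfold Spec_find
  exact find_eq_find_alt path
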